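-- pv_equiv track=rewrite | github.com/LakeLab/GitAutomator | pr_uploader.py | make_pr_message
-- ===== SOURCE A (Python) =====
-- def make_pr_message(commit_message):
--     messages = commit_message.split("\n")
--     result = None
--     for message in messages:
--         message = message.strip()
--         if message:
--             if result:
--                 if message.startswith("-") or message.startswith("*"):
--                     result = f"{result}\n    {message}"
--                 else:
--                     result = f"{result}\n    - {message}"
--             else:
--                 result = f"- [x] {message}"
--     return result
-- ===== SOURCE B (Python) =====
-- def make_pr_message(commit_message):
--     def tail(lines):
--         if not lines:
--             return ""
--         s = lines[0].strip()
--         rest = tail(lines[1:])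
--         if not s:
--             return rest
--         item = s if s.startswith(("-", "*")) else "- " + s
--         return "\n    " + item + rest
--
--     def render(lines):
--         if not lines:
--             return None
--         s = lines[0].strip()
--         if not s:
--             return render(lines[1:])
--         return "- [x] " + s + tail(lines[1:])
--
--     return render(commit_message.split("\n"))
-- ===== Notes on version B (the rewrite author's own statement) =====
-- stated objective: alternative
-- what changed: Replaces A's single stateful loop with an Option accumulator mutated per line by two structural recursions over the line list: one recursion skips blank lines until the header line and emits it, a second recursion builds the indented-item suffix for the remaining lines; no accumulator state is threaded.
import Mathlib
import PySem

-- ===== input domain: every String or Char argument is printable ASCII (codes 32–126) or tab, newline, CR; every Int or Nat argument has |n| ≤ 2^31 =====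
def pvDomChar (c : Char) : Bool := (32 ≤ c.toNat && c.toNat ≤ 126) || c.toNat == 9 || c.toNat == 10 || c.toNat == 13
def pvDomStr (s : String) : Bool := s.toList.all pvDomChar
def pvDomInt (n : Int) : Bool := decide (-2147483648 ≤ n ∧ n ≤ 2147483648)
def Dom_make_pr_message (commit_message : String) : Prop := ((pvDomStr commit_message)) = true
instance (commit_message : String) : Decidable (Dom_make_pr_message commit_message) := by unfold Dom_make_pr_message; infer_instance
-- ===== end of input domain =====

-- ===== PORT A =====
-- B replaces A's stateful accumulator loop by two structural recursions (header search + tail renderer);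
-- equal return value on all inputs. Ports work on List Char (PySem.Chars), exact on the stated domain.
def make_pr_message (commit_message : String) : Option String :=
  let messages := PySem.Chars.splitOn commit_message.toList ['\n']
  (messages.foldl (fun result message =>
    let m := PySem.Chars.strip message
    if m ≠ [] then
      match result with
      | some r =>
        if PySem.Chars.startswith m ['-'] || PySem.Chars.startswith m ['*'] then
          some (r ++ ('\n' :: "    ".toList) ++ m)
        else
          some (r ++ ('\n' :: "    - ".toList) ++ m)
      | none => some ("- [x] ".toList ++ m)
    else result) none).map String.ofList

-- ===== PORT B =====
-- helper 'tail' of Source B: suffix of indented items for the lines after the header line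
def pvTailB : List (List Char) → List Char
  | [] => []
  | l :: ls =>
    let s := PySem.Chars.strip l
    let rest := pvTailB ls
    if s = [] then rest
    else
      let item := if PySem.Chars.startswith s ['-'] || PySem.Chars.startswith s ['*'] then s
                  else "- ".toList ++ s
      ('\n' :: "    ".toList) ++ item ++ rest

-- helper 'render' of Source B: skip blank lines, emit header from the first non-empty one
def pvRenderB : List (List Char) → Option (List Char)
  | [] => none
  | l :: ls =>
    let s := PySem.Chars.strip l
    if s = [] then pvRenderB ls
    else some ("- [x] ".toList ++ s ++ pvTailB ls)

def make_pr_message_alt (commit_message : String) : Option String :=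
  (pvRenderB (PySem.Chars.splitOn commit_message.toList ['\n'])).map String.ofList

-- ===== PRECONDITION & SPEC =====
def Spec_make_pr_message (commit_message : String) (out : Option String) : Prop := out = make_pr_message_alt commit_message
instance (commit_message : String) (out : Option String) : Decidable (Spec_make_pr_message commit_message out) := by unfold Spec_make_pr_message; infer_instance

-- ===== CLAIM (what is proved, stated in full; the proofs are below) =====
def Claim_equal_make_pr_message : Prop := ∀ (commit_message : String), Dom_make_pr_message commit_message → Spec_make_pr_message commit_message (make_pr_message commit_message)

-- ===== LEMMAS AND PROOFS =====

-- what A appends for one kept tail line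
def pvItem (s : List Char) : List Char :=
  ('\n' :: "    ".toList) ++
    (if PySem.Chars.startswith s ['-'] || PySem.Chars.startswith s ['*'] then s
     else "- ".toList ++ s)

-- A's loop body
def pvStep (result : Option (List Char)) (message : List Char) : Option (List Char) :=
  let m := PySem.Chars.strip message
  if m ≠ [] then
    match result with
    | some r =>
      if PySem.Chars.startswith m ['-'] || PySem.Chars.startswith m ['*'] then
        some (r ++ ('\n' :: "    ".toList) ++ m)
      else
        some (r ++ ('\n' :: "    - ".toList) ++ m)
    | none => some ("- [x] ".toList ++ m)
  else result

lemma pvStep_some (r m : List Char) :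
    pvStep (some r) m =
      if PySem.Chars.strip m ≠ [] then some (r ++ pvItem (PySem.Chars.strip m)) else some r := by
  unfold pvStep pvItem
  split_ifs with h1 h2 <;> simp_all

lemma pvTailB_cons (l : List Char) (ls : List (List Char)) :
    pvTailB (l :: ls) =
      if PySem.Chars.strip l = [] then pvTailB ls
      else pvItem (PySem.Chars.strip l) ++ pvTailB ls := by
  simp only [pvTailB, pvItem]

lemma foldl_pvStep_some (ms : List (List Char)) (r : List Char) :
    ms.foldl pvStep (some r) = some (r ++ pvTailB ms) := by
  induction ms generalizing r with
  | nil => simp [pvTailB]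
  | cons m ms ih =>
    rw [List.foldl_cons, pvStep_some, pvTailB_cons]
    split_ifs with h1 h2 <;> simp_all

lemma foldl_pvStep_none (ms : List (List Char)) :
    ms.foldl pvStep none = pvRenderB ms := by
  induction ms with
  | nil => rfl
  | cons m ms ih =>
    rw [List.foldl_cons]
    by_cases h : PySem.Chars.strip m = []
    · have hs : pvStep none m = none := by simp [pvStep, h]
      rw [hs, ih]
      simp [pvRenderB, h]
    · have hs : pvStep none m = some ("- [x] ".toList ++ PySem.Chars.strip m) := by
        simp [pvStep, h]
      rw [hs, foldl_pvStep_some]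
      simp [pvRenderB, h]

-- ===== VERDICT (by name: the statement is the Claim_ definition above) =====
theorem make_pr_message_spec : Claim_equal_make_pr_message := by
  intro s _
  show make_pr_message s = make_pr_message_alt s
  have hA : make_pr_message s =
      Option.map String.ofList ((PySem.Chars.splitOn s.toList ['\n']).foldl pvStep none) := rfl
  rw [hA, foldl_pvStep_none]
  rfl
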